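-- pv_equiv track=rewrite | github.com/Belfagor2005/Calendar | usr/lib/enigma2/python/Plugins/Extensions/Calendar/database_converter.py | _parse_file_content
-- ===== SOURCE A (Python) =====
-- def _parse_file_content(lines, direction):
--     """
--     Parse file content and extract data
--
--     Args:
--         lines: List of lines from file
--         direction: Conversion direction
--     """
--     data = {}
--     current_section = None
--
--     for line in lines:
--         line = line.strip()
--
--         # Detect sections
--         if line in ["[day]", "[contact]"]:
--             current_section = "main"
--         elif line == "[month]":
--             current_section = "month"
--         elif line.startswith("[") and line.endswith("]"):
--             current_section = line[1:-1]
--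
--         # Parse key-value pairs
--         elif current_section and ":" in line:
--             key, value = line.split(":", 1)
--             key = key.strip()
--             value = value.strip()
--
--             # Store data
--             if current_section == "month":
--                 data["month_" + key] = value
--             else:
--                 data[key] = value
--
--     return data
-- ===== SOURCE B (Python) =====
-- def _parse_file_content(lines, direction):
--     """Two-phase parser: first collect (section, key, value) entries in order,
--     then build the dict in a second pass."""
--     def _section_of(s):
--         if s in ("[day]", "[contact]"):
--             return "main"
--         if s == "[month]":
--             return "month"
--         if s.startswith("[") and s.endswith("]"):
--             return s[1:-1]
--         return None
--
--     entries = []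
--     section = None
--     for raw in lines:
--         line = raw.strip()
--         sec = _section_of(line)
--         if sec is not None:
--             section = sec
--         elif section and ":" in line:
--             key, value = line.split(":", 1)
--             entries.append((section, key.strip(), value.strip()))
--
--     data = {}
--     for sec, key, value in entries:
--         data[("month_" + key) if sec == "month" else key] = value
--     return data
-- ===== Notes on version B (the rewrite author's own statement) =====
-- stated objective: alternative
-- what changed: B is a two-phase parser: phase one resolves section headers with a classifier helper and collects the active-section (section, key, value) entries into an ordered list; phase two builds the dict from that list, prefixing 'month_' keys, instead of A's single loop that mutates the dict while tracking the section.
import Mathlib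
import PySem

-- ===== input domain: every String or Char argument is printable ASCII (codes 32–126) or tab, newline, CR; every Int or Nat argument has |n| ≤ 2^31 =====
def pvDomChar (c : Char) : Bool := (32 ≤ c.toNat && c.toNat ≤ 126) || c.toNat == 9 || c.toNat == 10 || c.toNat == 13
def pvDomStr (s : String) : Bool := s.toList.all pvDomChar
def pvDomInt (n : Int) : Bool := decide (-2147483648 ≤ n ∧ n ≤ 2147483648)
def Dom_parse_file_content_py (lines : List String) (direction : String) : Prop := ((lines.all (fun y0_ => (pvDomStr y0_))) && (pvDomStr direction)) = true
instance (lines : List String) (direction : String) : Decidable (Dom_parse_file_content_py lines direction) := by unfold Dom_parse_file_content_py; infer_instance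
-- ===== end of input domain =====

-- B re-decomposes A's single stateful loop into two phases (collect entries, then build the dict); objective: alternative decomposition, same cost.

-- ===== PORT A =====
-- Python truthiness of `current_section` (None or a string)
def pfcTruthy : Option String → Bool
  | none => false
  | some s => s ≠ ""

-- one iteration of A's loop; state = (data, current_section)
def pfcStepA (st : PySem.Dict String String × Option String) (raw : String) :
    PySem.Dict String String × Option String :=
  let line := PySem.Str.strip raw
  if line = "[day]" ∨ line = "[contact]" then (st.1, some "main")
  else if line = "[month]" then (st.1, some "month")
  else if PySem.Str.startswith line "[" && PySem.Str.endswith line "]" then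
    (st.1, some (PySem.Str.slice line (some 1) (some (-1))))
  else if pfcTruthy st.2 && PySem.Str.isIn ":" line then
    let parts := (PySem.Str.splitMax? line ":" 1).getD []
    let key := PySem.Str.strip (parts.headD "")
    let value := PySem.Str.strip (parts.getD 1 "")
    if st.2 = some "month" then (st.1.insert ("month_" ++ key) value, st.2)
    else (st.1.insert key value, st.2)
  else st

def parse_file_content_py (lines : List String) (_direction : String) : List (String × String) :=
  (lines.foldl pfcStepA (PySem.Dict.empty, none)).1.items

-- ===== PORT B =====
-- classify a stripped line as a section header
def pfcSectionOf (s : String) : Option String :=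
  if s = "[day]" ∨ s = "[contact]" then some "main"
  else if s = "[month]" then some "month"
  else if PySem.Str.startswith s "[" && PySem.Str.endswith s "]" then
    some (PySem.Str.slice s (some 1) (some (-1)))
  else none

-- phase 1: collect (section, key, value) entries in order
def pfcCollect : List String → Option String → List (String × String × String)
  | [], _ => []
  | raw :: rest, section_ =>
    let line := PySem.Str.strip raw
    match pfcSectionOf line with
    | some sec => pfcCollect rest (some sec)
    | none =>
      if pfcTruthy section_ && PySem.Str.isIn ":" line then
        let parts := (PySem.Str.splitMax? line ":" 1).getD []
        (section_.getD "", PySem.Str.strip (parts.headD ""),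
          PySem.Str.strip (parts.getD 1 "")) :: pfcCollect rest section_
      else pfcCollect rest section_

def parse_file_content_py_alt (lines : List String) (_direction : String) : List (String × String) :=
  -- phase 2: build the dict from the collected entries
  ((pfcCollect lines none).foldl
    (fun d (e : String × String × String) =>
      d.insert (if e.1 = "month" then "month_" ++ e.2.1 else e.2.1) e.2.2)
    PySem.Dict.empty).items

-- ===== PRECONDITION & SPEC =====
def Spec_parse_file_content_py (lines : List String) (direction : String) (out : List (String × String)) : Prop := out = parse_file_content_py_alt lines direction
instance (lines : List String) (direction : String) (out : List (String × String)) : Decidable (Spec_parse_file_content_py lines direction out) := by unfold Spec_parse_file_content_py; infer_instance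

-- ===== CLAIM (what is proved, stated in full; the proofs are below) =====
def Claim_equal_parse_file_content_py : Prop := ∀ (lines : List String) (direction : String), Dom_parse_file_content_py lines direction → Spec_parse_file_content_py lines direction (parse_file_content_py lines direction)

-- ===== LEMMAS AND PROOFS =====

def pfcStepB (d : PySem.Dict String String) (e : String × String × String) :
    PySem.Dict String String :=
  d.insert (if e.1 = "month" then "month_" ++ e.2.1 else e.2.1) e.2.2

-- A's loop body, phrased through B's classifier and dict-step
theorem stepA_cases (d : PySem.Dict String String) (sec : Option String) (raw : String) :
    pfcStepA (d, sec) raw =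
      match pfcSectionOf (PySem.Str.strip raw) with
      | some s => (d, some s)
      | none =>
        if pfcTruthy sec && PySem.Str.isIn ":" (PySem.Str.strip raw) then
          (pfcStepB d (sec.getD "",
            PySem.Str.strip (((PySem.Str.splitMax? (PySem.Str.strip raw) ":" 1).getD []).headD ""),
            PySem.Str.strip (((PySem.Str.splitMax? (PySem.Str.strip raw) ":" 1).getD []).getD 1 "")), sec)
        else (d, sec) := by
  unfold pfcStepA pfcSectionOf pfcStepB
  by_cases h1 : PySem.Str.strip raw = "[day]" ∨ PySem.Str.strip raw = "[contact]"
  · simp [h1]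
  · by_cases h2 : PySem.Str.strip raw = "[month]"
    · simp [h2]
    · by_cases h3 : (PySem.Str.startswith (PySem.Str.strip raw) "[" &&
          PySem.Str.endswith (PySem.Str.strip raw) "]") = true
      · simp [h1, h2]
        split_ifs <;> simp_all
      · by_cases h4 : (pfcTruthy sec && PySem.Str.isIn ":" (PySem.Str.strip raw)) = true
        · obtain ⟨s, rfl⟩ : ∃ s, sec = some s := by
            cases sec with
            | none => simp [pfcTruthy] at h4
            | some s => exact ⟨s, rfl⟩
          by_cases h5 : s = "month"
          · simp [h1, h2]
            split_ifs <;> simp_all [pfcTruthy]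
          · simp [h1, h2, h5]
            split_ifs <;> simp_all [pfcTruthy]
        · simp [h1, h2]
          split_ifs <;> simp_all [pfcTruthy]

theorem pfc_main (lines : List String) :
    ∀ (sec : Option String) (d : PySem.Dict String String),
    (lines.foldl pfcStepA (d, sec)).1 = (pfcCollect lines sec).foldl pfcStepB d := by
  induction lines with
  | nil => intro sec d; simp [pfcCollect]
  | cons raw rest ih =>
    intro sec d
    rw [List.foldl_cons, stepA_cases]
    simp only [pfcCollect]
    cases hcl : pfcSectionOf (PySem.Str.strip raw) with
    | some s => simp only [ih]
    | none =>
      by_cases h4 : (pfcTruthy sec && PySem.Str.isIn ":" (PySem.Str.strip raw)) = true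
      · simp only [h4, if_true, List.foldl_cons, ih]
      · simp only [h4, if_false, Bool.false_eq_true, ih]

-- ===== VERDICT (by name: the statement is the Claim_ definition above) =====
theorem parse_file_content_py_spec : Claim_equal_parse_file_content_py := by
  intro lines direction _
  unfold Spec_parse_file_content_py parse_file_content_py parse_file_content_py_alt
  rw [pfc_main]
  rfl
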